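-- pv_equiv track=rewrite | github.com/catsplus/radiograb | backend/services/rclone_service.py | generate_rclone_config
-- ===== SOURCE A (Python) =====
-- from typing import List, Dict, Optional, Tuple
--
-- def generate_rclone_config(remote_name: str, backend_type: str, config_data: Dict) -> Dict:
--     """Generate rclone configuration section for a backend type"""
--     config = {'type': backend_type}
--
--     # Backend-specific configuration
--     if backend_type == 'drive':
--         # Google Drive configuration
--         config.update({
--             'client_id': config_data.get('client_id', ''),
--             'client_secret': config_data.get('client_secret', ''),
--             'scope': config_data.get('scope', 'drive'),
--             'token': config_data.get('token', '{}'),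
--             'team_drive': config_data.get('team_drive', ''),
--             'root_folder_id': config_data.get('root_folder_id', '')
--         })
--
--     elif backend_type == 'sftp':
--         # SFTP configuration
--         config.update({
--             'host': config_data.get('host', ''),
--             'user': config_data.get('user', ''),
--             'port': config_data.get('port', '22'),
--             'pass': config_data.get('password', ''),
--             'key_file': config_data.get('key_file', ''),
--             'key_file_pass': config_data.get('key_file_pass', ''),
--             'pubkey_file': config_data.get('pubkey_file', ''),
--             'known_hosts_file': config_data.get('known_hosts_file', ''),
--             'skip_links': config_data.get('skip_links', 'false')
--         })
--
--     elif backend_type == 'dropbox':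
--         # Dropbox configuration
--         config.update({
--             'client_id': config_data.get('client_id', ''),
--             'client_secret': config_data.get('client_secret', ''),
--             'token': config_data.get('token', '{}'),
--             'chunk_size': config_data.get('chunk_size', '48M')
--         })
--
--     elif backend_type == 'onedrive':
--         # OneDrive configuration
--         config.update({
--             'client_id': config_data.get('client_id', ''),
--             'client_secret': config_data.get('client_secret', ''),
--             'token': config_data.get('token', '{}'),
--             'drive_id': config_data.get('drive_id', ''),
--             'drive_type': config_data.get('drive_type', 'personal')
--         })
--
--     # Remove empty values
--     return {k: v for k, v in config.items() if v}
-- ===== SOURCE B (Python) =====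
-- # Inverted traversal: seed a per-backend defaults dict, then make ONE pass over the
-- # user's config_data, overlaying recognised keys (via a source->output key map);
-- # A instead walks the field list and pulls each value out of config_data.
-- DEFAULTS = {
--     'drive': {'client_id': '', 'client_secret': '', 'scope': 'drive', 'token': '{}',
--               'team_drive': '', 'root_folder_id': ''},
--     'sftp': {'host': '', 'user': '', 'port': '22', 'pass': '', 'key_file': '',
--              'key_file_pass': '', 'pubkey_file': '', 'known_hosts_file': '',
--              'skip_links': 'false'},
--     'dropbox': {'client_id': '', 'client_secret': '', 'token': '{}', 'chunk_size': '48M'},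
--     'onedrive': {'client_id': '', 'client_secret': '', 'token': '{}', 'drive_id': '',
--                  'drive_type': 'personal'},
-- }
--
-- # source key in config_data -> output key in the generated section
-- SOURCES = {
--     'drive': {'client_id': 'client_id', 'client_secret': 'client_secret', 'scope': 'scope',
--               'token': 'token', 'team_drive': 'team_drive', 'root_folder_id': 'root_folder_id'},
--     'sftp': {'host': 'host', 'user': 'user', 'port': 'port', 'password': 'pass',
--              'key_file': 'key_file', 'key_file_pass': 'key_file_pass',
--              'pubkey_file': 'pubkey_file', 'known_hosts_file': 'known_hosts_file',
--              'skip_links': 'skip_links'},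
--     'dropbox': {'client_id': 'client_id', 'client_secret': 'client_secret',
--                 'token': 'token', 'chunk_size': 'chunk_size'},
--     'onedrive': {'client_id': 'client_id', 'client_secret': 'client_secret',
--                  'token': 'token', 'drive_id': 'drive_id', 'drive_type': 'drive_type'},
-- }
--
--
-- def generate_rclone_config(remote_name: str, backend_type: str, config_data: dict) -> dict:
--     sources = SOURCES.get(backend_type, {})
--     config = {'type': backend_type, **DEFAULTS.get(backend_type, {})}
--     for key, value in config_data.items():
--         out = sources.get(key)
--         if out is not None:
--             config[out] = value
--     return {k: v for k, v in config.items() if v}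
-- ===== Notes on version B (the rewrite author's own statement) =====
-- stated objective: alternative
-- what changed: Inverts the traversal: instead of A's per-backend branch that pulls each schema field out of config_data with a chain of .get calls, B seeds a per-backend defaults dict and makes a single pass over config_data itself, overlaying each recognised key through a source-to-output key map (which carries the password->pass rename), then applies the same truthy filter.
import Mathlib
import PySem

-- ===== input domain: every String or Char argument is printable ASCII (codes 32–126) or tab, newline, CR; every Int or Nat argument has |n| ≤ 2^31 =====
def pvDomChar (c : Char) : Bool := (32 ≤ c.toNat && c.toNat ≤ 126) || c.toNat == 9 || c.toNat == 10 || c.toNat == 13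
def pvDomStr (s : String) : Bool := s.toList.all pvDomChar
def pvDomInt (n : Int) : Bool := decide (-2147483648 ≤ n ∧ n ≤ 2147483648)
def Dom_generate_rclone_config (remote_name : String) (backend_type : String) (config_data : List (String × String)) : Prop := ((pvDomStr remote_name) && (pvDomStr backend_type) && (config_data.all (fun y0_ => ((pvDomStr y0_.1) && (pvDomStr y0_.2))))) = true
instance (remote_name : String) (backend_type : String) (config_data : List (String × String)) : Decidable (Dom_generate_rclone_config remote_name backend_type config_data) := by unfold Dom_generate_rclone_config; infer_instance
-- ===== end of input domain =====

-- B inverts the traversal: a per-backend defaults dict overlaid by ONE pass over config_data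
-- through a source->output key map ('alternative' objective); return-value equivalence only.

-- ===== PORT A =====
-- literal transliteration of A: per-backend branch chain of dict.update literals, then truthy filter
def generate_rclone_config (remote_name : String) (backend_type : String) (config_data : List (String × String)) : List (String × String) :=
  (if backend_type == "drive" then
    ((PySem.Dict.empty.insert "type" backend_type).update
      [("client_id", (PySem.Dict.mk config_data).getD "client_id" ""),
       ("client_secret", (PySem.Dict.mk config_data).getD "client_secret" ""),
       ("scope", (PySem.Dict.mk config_data).getD "scope" "drive"),
       ("token", (PySem.Dict.mk config_data).getD "token" "{}"),
       ("team_drive", (PySem.Dict.mk config_data).getD "team_drive" ""),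
       ("root_folder_id", (PySem.Dict.mk config_data).getD "root_folder_id" "")])
  else if backend_type == "sftp" then
    ((PySem.Dict.empty.insert "type" backend_type).update
      [("host", (PySem.Dict.mk config_data).getD "host" ""),
       ("user", (PySem.Dict.mk config_data).getD "user" ""),
       ("port", (PySem.Dict.mk config_data).getD "port" "22"),
       ("pass", (PySem.Dict.mk config_data).getD "password" ""),
       ("key_file", (PySem.Dict.mk config_data).getD "key_file" ""),
       ("key_file_pass", (PySem.Dict.mk config_data).getD "key_file_pass" ""),
       ("pubkey_file", (PySem.Dict.mk config_data).getD "pubkey_file" ""),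
       ("known_hosts_file", (PySem.Dict.mk config_data).getD "known_hosts_file" ""),
       ("skip_links", (PySem.Dict.mk config_data).getD "skip_links" "false")])
  else if backend_type == "dropbox" then
    ((PySem.Dict.empty.insert "type" backend_type).update
      [("client_id", (PySem.Dict.mk config_data).getD "client_id" ""),
       ("client_secret", (PySem.Dict.mk config_data).getD "client_secret" ""),
       ("token", (PySem.Dict.mk config_data).getD "token" "{}"),
       ("chunk_size", (PySem.Dict.mk config_data).getD "chunk_size" "48M")])
  else if backend_type == "onedrive" then
    ((PySem.Dict.empty.insert "type" backend_type).update
      [("client_id", (PySem.Dict.mk config_data).getD "client_id" ""),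
       ("client_secret", (PySem.Dict.mk config_data).getD "client_secret" ""),
       ("token", (PySem.Dict.mk config_data).getD "token" "{}"),
       ("drive_id", (PySem.Dict.mk config_data).getD "drive_id" ""),
       ("drive_type", (PySem.Dict.mk config_data).getD "drive_type" "personal")])
  else (PySem.Dict.empty.insert "type" backend_type)).items.filter (fun p => p.2 != "")

-- ===== PORT B =====
-- DEFAULTS: backend_type -> ordered (output key, default) pairs (Source B's DEFAULTS dict)
def pvDefaults : PySem.Dict String (List (String × String)) :=
  PySem.Dict.mk
    [("drive", [("client_id", ""), ("client_secret", ""), ("scope", "drive"), ("token", "{}"),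
                ("team_drive", ""), ("root_folder_id", "")]),
     ("sftp", [("host", ""), ("user", ""), ("port", "22"), ("pass", ""), ("key_file", ""),
               ("key_file_pass", ""), ("pubkey_file", ""), ("known_hosts_file", ""),
               ("skip_links", "false")]),
     ("dropbox", [("client_id", ""), ("client_secret", ""), ("token", "{}"), ("chunk_size", "48M")]),
     ("onedrive", [("client_id", ""), ("client_secret", ""), ("token", "{}"), ("drive_id", ""),
                   ("drive_type", "personal")])]

-- SOURCES: backend_type -> (source key in config_data, output key) pairs (Source B's SOURCES dict)
def pvSources : PySem.Dict String (List (String × String)) :=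
  PySem.Dict.mk
    [("drive", [("client_id", "client_id"), ("client_secret", "client_secret"), ("scope", "scope"),
                ("token", "token"), ("team_drive", "team_drive"), ("root_folder_id", "root_folder_id")]),
     ("sftp", [("host", "host"), ("user", "user"), ("port", "port"), ("password", "pass"),
               ("key_file", "key_file"), ("key_file_pass", "key_file_pass"),
               ("pubkey_file", "pubkey_file"), ("known_hosts_file", "known_hosts_file"),
               ("skip_links", "skip_links")]),
     ("dropbox", [("client_id", "client_id"), ("client_secret", "client_secret"),
                  ("token", "token"), ("chunk_size", "chunk_size")]),
     ("onedrive", [("client_id", "client_id"), ("client_secret", "client_secret"),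
                   ("token", "token"), ("drive_id", "drive_id"), ("drive_type", "drive_type")])]

-- items() of the Python dict the assoc list represents (first occurrence of each key wins,
-- matching the convention's first-match lookup); models Source B's 'for key, value in config_data.items()'
def pvDictItemsAux : List String → List (String × String) → List (String × String)
  | _, [] => []
  | seen, p :: rest =>
    if p.1 ∈ seen then pvDictItemsAux seen rest
    else p :: pvDictItemsAux (p.1 :: seen) rest

def pvDictItems (cd : List (String × String)) : List (String × String) :=
  pvDictItemsAux [] cd

def generate_rclone_config_alt (remote_name : String) (backend_type : String) (config_data : List (String × String)) : List (String × String) :=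
  ((pvDictItems config_data).foldl
    (fun c kv =>
      match (PySem.Dict.mk (pvSources.getD backend_type [])).get? kv.1 with
      | some out => c.insert out kv.2
      | none => c)
    (PySem.Dict.mk (("type", backend_type) :: pvDefaults.getD backend_type []))).items.filter
    (fun p => p.2 != "")

-- ===== PRECONDITION & SPEC =====
def Spec_generate_rclone_config (remote_name : String) (backend_type : String) (config_data : List (String × String)) (out : List (String × String)) : Prop := out = generate_rclone_config_alt remote_name backend_type config_data
instance (remote_name : String) (backend_type : String) (config_data : List (String × String)) (out : List (String × String)) : Decidable (Spec_generate_rclone_config remote_name backend_type config_data out) := by unfold Spec_generate_rclone_config; infer_instance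

-- ===== CLAIM (what is proved, stated in full; the proofs are below) =====
def Claim_equal_generate_rclone_config : Prop := ∀ (remote_name : String) (backend_type : String) (config_data : List (String × String)), Dom_generate_rclone_config remote_name backend_type config_data → Spec_generate_rclone_config remote_name backend_type config_data (generate_rclone_config remote_name backend_type config_data)

-- ===== LEMMAS AND PROOFS =====

-- schemas used only by the proofs: (output key, source key, default) per backend
def pvSchemaDrive : List (String × String × String) :=
  [("client_id", "client_id", ""), ("client_secret", "client_secret", ""),
   ("scope", "scope", "drive"), ("token", "token", "{}"),
   ("team_drive", "team_drive", ""), ("root_folder_id", "root_folder_id", "")]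
def pvSchemaSftp : List (String × String × String) :=
  [("host", "host", ""), ("user", "user", ""), ("port", "port", "22"), ("pass", "password", ""),
   ("key_file", "key_file", ""), ("key_file_pass", "key_file_pass", ""),
   ("pubkey_file", "pubkey_file", ""), ("known_hosts_file", "known_hosts_file", ""),
   ("skip_links", "skip_links", "false")]
def pvSchemaDropbox : List (String × String × String) :=
  [("client_id", "client_id", ""), ("client_secret", "client_secret", ""),
   ("token", "token", "{}"), ("chunk_size", "chunk_size", "48M")]
def pvSchemaOnedrive : List (String × String × String) :=
  [("client_id", "client_id", ""), ("client_secret", "client_secret", ""),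
   ("token", "token", "{}"), ("drive_id", "drive_id", ""), ("drive_type", "drive_type", "personal")]

lemma pvDictItemsAux_not_mem_seen (seen : List String) (l : List (String × String))
    (k : String) (h : k ∈ (pvDictItemsAux seen l).map Prod.fst) : k ∉ seen := by
  induction l generalizing seen with
  | nil => simp [pvDictItemsAux] at h
  | cons p rest ih =>
    rw [pvDictItemsAux] at h
    by_cases hp : p.1 ∈ seen
    · rw [if_pos hp] at h
      exact ih seen h
    · rw [if_neg hp, List.map_cons] at h
      rcases List.mem_cons.mp h with h | h
      · exact h ▸ hp
      · intro hk
        exact ih (p.1 :: seen) h (List.mem_cons_of_mem _ hk)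

lemma pvDictItemsAux_nodup (seen : List String) (l : List (String × String)) :
    ((pvDictItemsAux seen l).map Prod.fst).Nodup := by
  induction l generalizing seen with
  | nil => simp [pvDictItemsAux]
  | cons p rest ih =>
    rw [pvDictItemsAux]
    by_cases hp : p.1 ∈ seen
    · rw [if_pos hp]; exact ih seen
    · rw [if_neg hp, List.map_cons, List.nodup_cons]
      refine ⟨?_, ih (p.1 :: seen)⟩
      intro hmem
      exact pvDictItemsAux_not_mem_seen _ _ _ hmem (List.mem_cons_self ..)

lemma pvDictItems_nodup (l : List (String × String)) :
    ((pvDictItems l).map Prod.fst).Nodup := pvDictItemsAux_nodup [] l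

lemma pvDictItemsAux_find? (seen : List String) (l : List (String × String)) (s : String)
    (hs : s ∉ seen) :
    (pvDictItemsAux seen l).find? (fun kv => kv.1 == s) = l.find? (fun kv => kv.1 == s) := by
  induction l generalizing seen with
  | nil => rfl
  | cons p rest ih =>
    rw [pvDictItemsAux]
    by_cases hp : p.1 ∈ seen
    · rw [if_pos hp, List.find?_cons]
      have : (p.1 == s) = false := by
        simp only [beq_eq_false_iff_ne, ne_eq]
        intro he
        exact hs (he ▸ hp)
      rw [this, ih seen hs]
    · rw [if_neg hp, List.find?_cons, List.find?_cons]
      by_cases hps : (p.1 == s) = true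
      · rw [hps]
      · have hps' : (p.1 == s) = false := by simpa using hps
        rw [hps', ih (p.1 :: seen) ?_]
        intro hmem
        rcases List.mem_cons.mp hmem with h | h
        · exact hps (by simp [h])
        · exact hs h

lemma pvDictItems_find? (l : List (String × String)) (s : String) :
    (pvDictItems l).find? (fun kv => kv.1 == s) = l.find? (fun kv => kv.1 == s) :=
  pvDictItemsAux_find? [] l s (by simp)

lemma pv_get?_mem {ν : Type} (d : PySem.Dict String ν) (x : String) (v : ν)
    (h : d.get? x = some v) : (x, v) ∈ d.items := by
  unfold PySem.Dict.get? at h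
  cases hf : d.items.find? (fun p => p.1 == x) with
  | none => simp [hf] at h
  | some p =>
    have hm := List.mem_of_find?_eq_some hf
    have hp := List.find?_some hf
    simp only [hf, Option.map_some] at h
    have hx : p.1 = x := by simpa using hp
    have hv : p.2 = v := Option.some.inj h
    have : (x, v) = p := by rw [← hx, ← hv]
    exact this ▸ hm

lemma pv_fold_untouched (m : PySem.Dict String String) (L : List (String × String))
    (acc : PySem.Dict String String) (k : String)
    (h : ∀ kv ∈ L, m.get? kv.1 ≠ some k) :
    (L.foldl (fun c kv => match m.get? kv.1 with | some out => c.insert out kv.2 | none => c)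
      acc).get? k = acc.get? k := by
  induction L generalizing acc with
  | nil => rfl
  | cons kv rest ih =>
    simp only [List.foldl_cons]
    cases hm : m.get? kv.1 with
    | none => exact ih _ (fun x hx => h x (List.mem_cons_of_mem _ hx))
    | some out =>
      have hne : k ≠ out := fun he => h kv (List.mem_cons_self ..) (he ▸ hm)
      rw [ih _ (fun x hx => h x (List.mem_cons_of_mem _ hx))]
      exact PySem.Dict.get?_insert_of_ne _ _ hne

lemma pv_fold_hit (m : PySem.Dict String String) (L : List (String × String))
    (acc : PySem.Dict String String) (k s : String)
    (hs : m.get? s = some k)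
    (hinj : ∀ kv ∈ L, m.get? kv.1 = some k → kv.1 = s)
    (hnd : (L.map Prod.fst).Nodup) :
    (L.foldl (fun c kv => match m.get? kv.1 with | some out => c.insert out kv.2 | none => c)
      acc).get? k
    = ((L.find? (fun kv => kv.1 == s)).map Prod.snd).or (acc.get? k) := by
  induction L generalizing acc with
  | nil => simp
  | cons kv rest ih =>
    simp only [List.foldl_cons, List.find?_cons]
    by_cases hk : kv.1 = s
    · rw [List.map_cons] at hnd
      obtain ⟨hni, hnd'⟩ := List.nodup_cons.mp hnd
      have hm : m.get? kv.1 = some k := by rw [hk]; exact hs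
      rw [hm]
      have hrest : ∀ x ∈ rest, m.get? x.1 ≠ some k := by
        intro x hx he
        have hxs := hinj x (List.mem_cons_of_mem _ hx) he
        exact hni (List.mem_map.mpr ⟨x, hx, hxs.trans hk.symm⟩)
      rw [pv_fold_untouched _ _ _ _ hrest, PySem.Dict.get?_insert_self]
      have hbs : (kv.1 == s) = true := by simp [hk]
      simp [hbs]
    · rw [List.map_cons] at hnd
      have hbs : (kv.1 == s) = false := by simp [hk]
      have hnd' : (rest.map Prod.fst).Nodup := (List.nodup_cons.mp hnd).2
      have hinj' : ∀ x ∈ rest, m.get? x.1 = some k → x.1 = s :=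
        fun x hx => hinj x (List.mem_cons_of_mem _ hx)
      simp only [hbs]
      cases hm : m.get? kv.1 with
      | none => exact ih _ hinj' hnd'
      | some out =>
        have hne : k ≠ out := fun he => hk (hinj kv (List.mem_cons_self ..) (he ▸ hm))
        rw [ih _ hinj' hnd', PySem.Dict.get?_insert_of_ne _ _ hne]

lemma pv_fold_keys (m : PySem.Dict String String) (L : List (String × String))
    (acc : PySem.Dict String String)
    (h : ∀ kv ∈ L, ∀ ok, m.get? kv.1 = some ok → ok ∈ acc.keys) :
    (L.foldl (fun c kv => match m.get? kv.1 with | some out => c.insert out kv.2 | none => c)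
      acc).keys = acc.keys := by
  induction L generalizing acc with
  | nil => rfl
  | cons kv rest ih =>
    simp only [List.foldl_cons]
    cases hm : m.get? kv.1 with
    | none => exact ih _ (fun x hx => h x (List.mem_cons_of_mem _ hx))
    | some out =>
      have hc : acc.contains out = true :=
        (PySem.Dict.contains_iff_mem_keys acc out).mpr (h kv (List.mem_cons_self ..) out hm)
      have hkeys : (acc.insert out kv.2).keys = acc.keys :=
        PySem.Dict.keys_insert_of_contains acc kv.2 hc
      rw [ih _ (fun x hx ok hok => by
        rw [hkeys]; exact h x (List.mem_cons_of_mem _ hx) ok hok), hkeys]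

-- the master lemma: B's overlay fold, for one backend's schema, produces exactly
-- the items list A's update produces
lemma pvMaster (bt : String) (cd : List (String × String))
    (schema : List (String × String × String))
    (sources : PySem.Dict String String) (defaults : List (String × String))
    (hsrc : sources = PySem.Dict.mk (schema.map (fun t => (t.2.1, t.1))))
    (hdef : defaults = schema.map (fun t => (t.1, t.2.2)))
    (hout : (schema.map (fun t => t.1)).Nodup)
    (hsrcn : (schema.map (fun t => t.2.1)).Nodup)
    (htype : "type" ∉ schema.map (fun t => t.1)) :
    ((pvDictItems cd).foldl
      (fun c kv => match sources.get? kv.1 with | some out => c.insert out kv.2 | none => c)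
      (PySem.Dict.mk (("type", bt) :: defaults))).items
    = ("type", bt) :: schema.map (fun t => (t.1, (PySem.Dict.mk cd).getD t.2.1 t.2.2)) := by
  subst hsrc hdef
  set m := PySem.Dict.mk (schema.map (fun t => (t.2.1, t.1))) with hm
  set D0 := PySem.Dict.mk (("type", bt) :: schema.map (fun t => (t.1, t.2.2))) with hD0
  have hkeys0 : D0.keys = "type" :: schema.map (fun t => t.1) := by
    simp [hD0, PySem.Dict.keys, Function.comp]
  have hnd0 : D0.keys.Nodup := by rw [hkeys0]; exact List.nodup_cons.mpr ⟨htype, hout⟩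
  have hmkeys : m.keys = schema.map (fun t => t.2.1) := by
    simp [hm, PySem.Dict.keys, Function.comp]
  -- any value produced by m is an output key of the schema, hence a key of D0
  have hval : ∀ (x ok : String), m.get? x = some ok → ok ∈ schema.map (fun t => t.1) := by
    intro x ok h
    have hmem : (x, ok) ∈ schema.map (fun t => (t.2.1, t.1)) := pv_get?_mem m x ok h
    rcases List.mem_map.mp hmem with ⟨t, ht, hteq⟩
    exact List.mem_map.mpr ⟨t, ht, congrArg Prod.snd hteq⟩
  have hkeys : ((pvDictItems cd).foldl
      (fun c kv => match m.get? kv.1 with | some out => c.insert out kv.2 | none => c)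
      D0).keys = D0.keys := by
    refine pv_fold_keys m _ D0 ?_
    intro kv _ ok hok
    rw [hkeys0]
    exact List.mem_cons_of_mem _ (hval kv.1 ok hok)
  set R := (pvDictItems cd).foldl
      (fun c kv => match m.get? kv.1 with | some out => c.insert out kv.2 | none => c) D0 with hR
  have hndR : R.keys.Nodup := by rw [hkeys]; exact hnd0
  rw [PySem.Dict.items_eq_map_keys R hndR "", hkeys, hkeys0, List.map_cons, List.map_map]
  -- the "type" entry is never touched by the fold
  have htypeval : R.getD "type" "" = bt := by
    have huntouched : ∀ kv ∈ pvDictItems cd, m.get? kv.1 ≠ some "type" := by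
      intro kv _ he
      exact htype (hval kv.1 "type" he)
    have h0 : D0.get? "type" = some bt := by
      rw [hD0, PySem.Dict.get?_mk_cons]; simp
    rw [PySem.Dict.getD, hR, pv_fold_untouched m _ D0 "type" huntouched, h0]
    rfl
  rw [htypeval]
  congr 1
  refine List.map_congr_left ?_
  intro t ht
  have hst : m.get? t.2.1 = some t.1 := by
    refine PySem.Dict.get?_of_mem_items m ?_ (by rw [hmkeys]; exact hsrcn)
    exact (List.mem_map.mpr ⟨t, ht, rfl⟩ : (t.2.1, t.1) ∈ schema.map (fun t => (t.2.1, t.1)))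
  have hinj : ∀ kv ∈ pvDictItems cd, m.get? kv.1 = some t.1 → kv.1 = t.2.1 := by
    intro kv _ he
    have hmem : (kv.1, t.1) ∈ schema.map (fun t => (t.2.1, t.1)) := pv_get?_mem m kv.1 t.1 he
    rcases List.mem_map.mp hmem with ⟨u, hu, hueq⟩
    obtain ⟨h1, h2⟩ := Prod.mk.inj hueq
    have hut : u = t := List.inj_on_of_nodup_map hout hu ht h2
    rw [← h1, hut]
  have h0t : D0.get? t.1 = some t.2.2 := by
    refine PySem.Dict.get?_of_mem_items D0 ?_ hnd0
    exact List.mem_cons_of_mem _ (List.mem_map.mpr ⟨t, ht, rfl⟩)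
  have hRg : R.get? t.1
      = ((cd.find? (fun kv => kv.1 == t.2.1)).map Prod.snd).or (some t.2.2) := by
    rw [hR, pv_fold_hit m _ D0 t.1 t.2.1 hst hinj (pvDictItems_nodup cd),
      pvDictItems_find?, h0t]
  show (t.1, R.getD t.1 "") = (t.1, (PySem.Dict.mk cd).getD t.2.1 t.2.2)
  have : R.getD t.1 "" = (PySem.Dict.mk cd).getD t.2.1 t.2.2 := by
    rw [PySem.Dict.getD, hRg, PySem.Dict.getD, PySem.Dict.get?]
    cases cd.find? (fun kv => kv.1 == t.2.1) <;> rfl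
  rw [this]

-- unknown backend: the sources map is empty, so the fold does nothing
lemma pv_fold_empty (L : List (String × String)) (acc : PySem.Dict String String) :
    (L.foldl (fun c kv =>
      match (PySem.Dict.mk ([] : List (String × String))).get? kv.1 with
      | some out => c.insert out kv.2
      | none => c) acc) = acc := by
  induction L generalizing acc with
  | nil => rfl
  | cons kv rest ih => simpa [PySem.Dict.get?] using ih acc

-- ===== VERDICT (by name: the statement is the Claim_ definition above) =====
set_option maxHeartbeats 1600000 in
theorem generate_rclone_config_spec : Claim_equal_generate_rclone_config := by
  intro rn bt cd _
  unfold Spec_generate_rclone_config generate_rclone_config generate_rclone_config_alt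
  by_cases h1 : bt = "drive"
  · subst h1
    rw [pvMaster "drive" cd pvSchemaDrive (PySem.Dict.mk (pvSources.getD "drive" []))
        (pvDefaults.getD "drive" []) rfl rfl (by decide) (by decide) (by decide)]
    rfl
  · by_cases h2 : bt = "sftp"
    · subst h2
      rw [pvMaster "sftp" cd pvSchemaSftp (PySem.Dict.mk (pvSources.getD "sftp" []))
        (pvDefaults.getD "sftp" []) rfl rfl (by decide) (by decide) (by decide)]
      rfl
    · by_cases h3 : bt = "dropbox"
      · subst h3
        rw [pvMaster "dropbox" cd pvSchemaDropbox (PySem.Dict.mk (pvSources.getD "dropbox" []))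
        (pvDefaults.getD "dropbox" []) rfl rfl (by decide) (by decide) (by decide)]
        rfl
      · by_cases h4 : bt = "onedrive"
        · subst h4
          rw [pvMaster "onedrive" cd pvSchemaOnedrive (PySem.Dict.mk (pvSources.getD "onedrive" []))
        (pvDefaults.getD "onedrive" []) rfl rfl (by decide) (by decide) (by decide)]
          rfl
        · have hb1 : (bt == "drive") = false := by simp [h1]
          have hb2 : (bt == "sftp") = false := by simp [h2]
          have hb3 : (bt == "dropbox") = false := by simp [h3]
          have hb4 : (bt == "onedrive") = false := by simp [h4]
          have hc1 : ("drive" == bt) = false := by simp [Ne.symm h1]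
          have hc2 : ("sftp" == bt) = false := by simp [Ne.symm h2]
          have hc3 : ("dropbox" == bt) = false := by simp [Ne.symm h3]
          have hc4 : ("onedrive" == bt) = false := by simp [Ne.symm h4]
          have hsrc : pvSources.getD bt [] = [] := by
            unfold pvSources
            simp [PySem.Dict.getD, PySem.Dict.get?, List.find?_cons, hc1, hc2, hc3, hc4]
          have hdef : pvDefaults.getD bt [] = [] := by
            unfold pvDefaults
            simp [PySem.Dict.getD, PySem.Dict.get?, List.find?_cons, hc1, hc2, hc3, hc4]
          rw [hb1, hb2, hb3, hb4, hsrc, hdef]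
          simp only [Bool.false_eq_true, if_false]
          rw [pv_fold_empty]
          rfl
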